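-- pv_equiv track=rewrite | github.com/HyunseokDE/hyunseok2 | 프로그래머스/1/82612. 부족한 금액 계산하기/부족한 금액 계산하기.py | solution
-- ===== SOURCE A (Python) =====
-- def solution(price, money, count):
--     answer = 0
--     total = 0
--     for i in range(1,count+1):
--         total += price*i
--
--     if money > total:
--         return answer
--     else:
--         return total - money
-- ===== SOURCE B (Python) =====
-- def solution(price, money, count):
--     n = count if count > 0 else 0
--     total = price * n * (n + 1) // 2
--     return max(0, total - money)
-- ===== Notes on version B (the rewrite author's own statement) =====
-- stated objective: faster
-- what changed: Replaces the O(count) loop summing price*i with the closed-form arithmetic-series formula price*n*(n+1)//2 and a max for the shortfall.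
import Mathlib
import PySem

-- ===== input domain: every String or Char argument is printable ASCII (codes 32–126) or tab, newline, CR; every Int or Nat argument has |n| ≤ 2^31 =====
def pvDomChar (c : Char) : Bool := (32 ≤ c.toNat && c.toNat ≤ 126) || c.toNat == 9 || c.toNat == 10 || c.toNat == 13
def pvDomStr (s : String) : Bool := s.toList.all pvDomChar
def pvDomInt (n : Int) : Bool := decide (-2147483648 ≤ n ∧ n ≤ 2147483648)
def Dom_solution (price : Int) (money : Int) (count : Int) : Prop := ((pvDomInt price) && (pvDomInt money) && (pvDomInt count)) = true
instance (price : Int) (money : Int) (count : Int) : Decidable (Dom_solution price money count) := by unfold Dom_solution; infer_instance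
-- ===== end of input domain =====

-- B replaces A's O(count) summation loop by the closed-form series formula (O(1)).

-- ===== PORT A =====
def solution (price : Int) (money : Int) (count : Int) : Int :=
  let answer : Int := 0
  let total : Int := (PySem.List.pyRange 1 (count + 1) 1).foldl (fun t i => t + price * i) 0
  if money > total then answer else total - money

-- ===== PORT B =====
def solution_alt (price : Int) (money : Int) (count : Int) : Int :=
  let n : Int := if count > 0 then count else 0
  let total : Int := PySem.Int.floordiv (price * n * (n + 1)) 2
  max 0 (total - money)

-- ===== PRECONDITION & SPEC =====
def Spec_solution (price : Int) (money : Int) (count : Int) (out : Int) : Prop := out = solution_alt price money count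
instance (price : Int) (money : Int) (count : Int) (out : Int) : Decidable (Spec_solution price money count out) := by unfold Spec_solution; infer_instance

-- ===== CLAIM (what is proved, stated in full; the proofs are below) =====
def Claim_equal_solution : Prop := ∀ (price : Int) (money : Int) (count : Int), Dom_solution price money count → Spec_solution price money count (solution price money count)

-- ===== LEMMAS AND PROOFS =====

-- the loop of A computes twice the closed-form series
theorem pv_fold_two (price : Int) (n : Nat) :
    2 * (PySem.List.pyRange 1 ((n : Int) + 1) 1).foldl (fun t i => t + price * i) 0
      = price * n * (n + 1) := by
  induction n with
  | zero =>
      rw [PySem.List.pyRange_one_eq_nil (by omega : ((0:Nat):Int) + 1 ≤ 1)]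
      simp
  | succ m ih =>
      have h : PySem.List.pyRange 1 ((m : Int) + 1 + 1) 1
          = PySem.List.pyRange 1 ((m : Int) + 1) 1 ++ [(m : Int) + 1] :=
        PySem.List.pyRange_one_succ_right (by omega)
      push_cast
      push_cast at ih
      rw [show ((m : Int) + 1 + 1) = ((m : Int) + 1) + 1 by ring, h, List.foldl_append]
      simp only [List.foldl_cons, List.foldl_nil]
      linear_combination ih

theorem pv_fdiv_two (x y : Int) (h : x = 2 * y) : PySem.Int.floordiv x 2 = y := by
  subst h
  simp [PySem.Int.floordiv]

theorem pv_main (price money count : Int) :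
    solution price money count = solution_alt price money count := by
  unfold solution solution_alt
  dsimp only
  by_cases hc : count > 0
  · obtain ⟨n, rfl⟩ : ∃ n : Nat, count = (n : Int) := ⟨count.toNat, by omega⟩
    have hf := pv_fold_two price n
    have hd : PySem.Int.floordiv (price * (n : Int) * ((n : Int) + 1)) 2
        = (PySem.List.pyRange 1 ((n : Int) + 1) 1).foldl (fun t i => t + price * i) 0 :=
      pv_fdiv_two _ _ hf.symm
    rw [if_pos hc, hd]
    omega
  · rw [PySem.List.pyRange_one_eq_nil (by omega : count + 1 ≤ 1), if_neg hc]
    have hd : PySem.Int.floordiv (price * 0 * (0 + 1)) 2 = 0 :=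
      pv_fdiv_two _ 0 (by ring)
    rw [hd]
    simp only [List.foldl_nil]
    omega

-- ===== VERDICT (by name: the statement is the Claim_ definition above) =====
theorem solution_spec : Claim_equal_solution := by
  intro price money count _
  exact pv_main price money count
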